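-- pv_equiv track=rewrite | github.com/DongJun1110/programmers | 대충만든자판.py | solution
-- ===== SOURCE A (Python) =====
-- def solution(keymap, targets):
--
--     answer = []
--     dict = {}
--
--     for key in keymap:
--         for e in key:
--             if e not in dict:
--                 dict[e] = key.index(e)+1
--             elif key.index(e)+1 < dict[e]:
--                 dict[e] = key.index(e)+1
--
--     for target in targets:
--         sum = 0
--         for e in target:
--             num = dict.get(e)
--             if num == None:
--                 sum = -1
--                 break
--             sum += num
--         answer.append(sum)
--
--     return answer
-- ===== SOURCE B (Python) =====
-- def solution(keymap, targets):
--     def best(ch):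
--         positions = [key.index(ch) + 1 for key in keymap if ch in key]
--         return min(positions) if positions else None
--
--     def score(target):
--         vals = [best(ch) for ch in target]
--         return -1 if None in vals else sum(vals)
--
--     return [score(target) for target in targets]
-- ===== Notes on version B (the rewrite author's own statement) =====
-- stated objective: idiomatic
-- what changed: B drops A's mutable char->min-position dictionary and break-driven accumulator loops: for each target character it computes the minimum 1-based first index with a list comprehension over keymap plus min(), and each target's score is sum() of those values (or -1 if any is missing), all expressed as comprehensions.
import Mathlib
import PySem

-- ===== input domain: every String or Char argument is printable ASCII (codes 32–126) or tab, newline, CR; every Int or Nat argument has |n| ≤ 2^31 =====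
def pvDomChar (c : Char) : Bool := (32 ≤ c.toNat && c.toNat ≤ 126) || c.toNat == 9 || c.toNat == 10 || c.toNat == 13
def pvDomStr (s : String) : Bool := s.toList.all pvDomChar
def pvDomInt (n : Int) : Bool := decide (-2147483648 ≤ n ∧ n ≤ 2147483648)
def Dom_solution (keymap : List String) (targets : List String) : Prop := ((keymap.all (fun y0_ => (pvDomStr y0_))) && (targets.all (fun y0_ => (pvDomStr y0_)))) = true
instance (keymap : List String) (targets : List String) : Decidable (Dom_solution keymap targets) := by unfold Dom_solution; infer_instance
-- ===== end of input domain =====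

-- B replaces A's mutable min-position dictionary and break-driven accumulator loops by
-- comprehension-style per-character min() scans and per-target sum() (objective: idiomatic, not faster).

-- ===== PORT A =====
-- inner loop body: 'if e not in dict: … elif key.index(e)+1 < dict[e]: …'
-- (the 'none' branch of index? is unreachable: e is drawn from key)
def pvStepInner (key : String) (d : PySem.Dict Char Int) (e : Char) : PySem.Dict Char Int :=
  match PySem.List.index? key.toList e with
  | none => d
  | some i =>
    match d.get? e with
    | none => d.insert e ((i : Int) + 1)
    | some v => if (i : Int) + 1 < v then d.insert e ((i : Int) + 1) else d

-- 'for key in keymap: for e in key: …'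
def pvBuildDict (keymap : List String) : PySem.Dict Char Int :=
  keymap.foldl (fun d key => key.toList.foldl (pvStepInner key) d) PySem.Dict.empty

-- 'for e in target: num = dict.get(e); if num == None: sum = -1; break; sum += num'
def pvGoA (d : PySem.Dict Char Int) : List Char → Int → Int
  | [], s => s
  | e :: rest, s =>
    match d.get? e with
    | none => -1
    | some n => pvGoA d rest (s + n)

def solution (keymap : List String) (targets : List String) : List Int :=
  let dict := pvBuildDict keymap
  targets.foldl (fun answer target => answer ++ [pvGoA dict target.toList 0]) []

-- ===== PORT B =====
-- 'positions = [key.index(ch) + 1 for key in keymap if ch in key]; min(positions) if positions else None'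
def pvBest (keymap : List String) (ch : Char) : Option Int :=
  let positions := keymap.filterMap (fun key =>
    if ch ∈ key.toList then (PySem.List.index? key.toList ch).map (fun (i : Nat) => (i : Int) + 1) else none)
  PySem.List.min? positions (fun x => x)

-- 'vals = [best(ch) for ch in target]; -1 if None in vals else sum(vals)'
def pvScore (keymap : List String) (target : String) : Int :=
  let vals := target.toList.map (pvBest keymap)
  if none ∈ vals then -1 else (vals.filterMap id).sum

def solution_alt (keymap : List String) (targets : List String) : List Int :=
  targets.map (pvScore keymap)

-- ===== PRECONDITION & SPEC =====
def Spec_solution (keymap : List String) (targets : List String) (out : List Int) : Prop := out = solution_alt keymap targets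
instance (keymap : List String) (targets : List String) (out : List Int) : Decidable (Spec_solution keymap targets out) := by unfold Spec_solution; infer_instance

-- ===== CLAIM (what is proved, stated in full; the proofs are below) =====
def Claim_equal_solution : Prop := ∀ (keymap : List String) (targets : List String), Dom_solution keymap targets → Spec_solution keymap targets (solution keymap targets)

-- ===== LEMMAS AND PROOFS =====

/-- first index of `c` in `key`, 1-based, as an option. -/
def pvPosIn (key : String) (c : Char) : Option Int :=
  (PySem.List.index? key.toList c).map (fun i => (i : Int) + 1)

/-- minimum of two optional values (`none` = absent). -/
def pvMergeMin : Option Int → Option Int → Option Int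
  | none, b => b
  | some p, none => some p
  | some p, some q => some (min p q)

/-- minimum 1-based first index of `c` over the keymaps containing it. -/
def pvMinOver : List String → Char → Option Int
  | [], _ => none
  | k :: ks, c => pvMergeMin (pvPosIn k c) (pvMinOver ks c)

theorem pvMergeMin_none_right (a : Option Int) : pvMergeMin a none = a := by
  cases a <;> rfl

theorem pvMergeMin_assoc (a b c : Option Int) :
    pvMergeMin (pvMergeMin a b) c = pvMergeMin a (pvMergeMin b c) := by
  cases a <;> cases b <;> cases c <;> simp [pvMergeMin, min_assoc]

theorem pvMergeMin_right_idem (a b : Option Int) :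
    pvMergeMin (pvMergeMin a b) b = pvMergeMin a b := by
  cases a <;> cases b <;> simp [pvMergeMin]

theorem pvPosIn_eq_none {key : String} {c : Char} (h : c ∉ key.toList) :
    pvPosIn key c = none := by
  unfold pvPosIn
  rw [(PySem.List.index?_eq_none_iff _ _).mpr h]
  rfl

theorem pvPosIn_eq_some {key : String} {c : Char} {i : Nat}
    (hi : PySem.List.index? key.toList c = some i) :
    pvPosIn key c = some ((i : Int) + 1) := by
  unfold pvPosIn
  rw [hi]
  rfl

theorem pvStepInner_get? (key : String) (d : PySem.Dict Char Int) (e : Char)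
    (he : e ∈ key.toList) (c : Char) :
    (pvStepInner key d e).get? c =
      if c = e then pvMergeMin (d.get? e) (pvPosIn key e) else d.get? c := by
  obtain ⟨i, hi⟩ := Option.isSome_iff_exists.mp ((PySem.List.index?_isSome_iff _ _).mpr he)
  unfold pvStepInner
  rw [hi, pvPosIn_eq_some hi]
  dsimp only
  by_cases hc : c = e
  · subst hc
    rw [if_pos rfl]
    cases hd : d.get? c with
    | none => rw [PySem.Dict.get?_insert_self]; rfl
    | some v =>
      dsimp only
      by_cases hlt : (i : Int) + 1 < v
      · rw [if_pos hlt, PySem.Dict.get?_insert_self]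
        exact congrArg some (by simp [min_def]; omega)
      · rw [if_neg hlt, hd]
        exact congrArg some (by simp [min_def]; omega)
  · rw [if_neg hc]
    cases hd : d.get? e with
    | none => exact PySem.Dict.get?_insert_of_ne _ _ hc
    | some v =>
      dsimp only
      split_ifs
      · exact PySem.Dict.get?_insert_of_ne _ _ hc
      · rfl

theorem pvInnerFold_get? (key : String) :
    ∀ (l : List Char), (∀ x ∈ l, x ∈ key.toList) → ∀ (d : PySem.Dict Char Int) (c : Char),
      (l.foldl (pvStepInner key) d).get? c =
        if c ∈ l then pvMergeMin (d.get? c) (pvPosIn key c) else d.get? c := by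
  intro l
  induction l with
  | nil => intro _ d c; simp
  | cons e l' ih =>
    intro hsub d c
    have he : e ∈ key.toList := hsub e (by simp)
    have hsub' : ∀ x ∈ l', x ∈ key.toList := fun x hx => hsub x (by simp [hx])
    simp only [List.foldl_cons]
    rw [ih hsub' _ c, pvStepInner_get? key d e he c]
    by_cases hce : c = e
    · subst hce
      by_cases hcl : c ∈ l'
      · simp [hcl, pvMergeMin_right_idem]
      · simp [hcl]
    · by_cases hcl : c ∈ l'
      · simp [hcl, hce]
      · simp [hcl, hce]

theorem pvBuildFold_get? :
    ∀ (ks : List String) (d : PySem.Dict Char Int) (c : Char),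
      (ks.foldl (fun d key => key.toList.foldl (pvStepInner key) d) d).get? c =
        pvMergeMin (d.get? c) (pvMinOver ks c) := by
  intro ks
  induction ks with
  | nil => intro d c; simp [pvMinOver, pvMergeMin_none_right]
  | cons k ks' ih =>
    intro d c
    simp only [List.foldl_cons]
    rw [ih _ c]
    have h1 : (k.toList.foldl (pvStepInner k) d).get? c = pvMergeMin (d.get? c) (pvPosIn k c) := by
      rw [pvInnerFold_get? k k.toList (fun x hx => hx) d c]
      by_cases hc : c ∈ k.toList
      · simp [hc]
      · simp [hc, pvPosIn_eq_none hc, pvMergeMin_none_right]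
    rw [h1, pvMergeMin_assoc, pvMinOver]

/-- `min?` with identity key over a cons is the optional min of the head and the tail's `min?`. -/
theorem pvFoldlMin_min (l : List Int) : ∀ (a b : Int),
    List.foldl min (min a b) l = min a (List.foldl min b l) := by
  induction l with
  | nil => intro a b; rfl
  | cons c l ih =>
    intro a b
    simp only [List.foldl_cons, min_assoc]
    exact ih a (min b c)

theorem pvMin?_cons (a : Int) (l : List Int) :
    PySem.List.min? (a :: l) (fun x => x) = pvMergeMin (some a) (PySem.List.min? l (fun x => x)) := by
  cases l with
  | nil => rfl
  | cons b l =>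
    rw [PySem.List.min?_id_cons, PySem.List.min?_id_cons]
    simp only [List.foldl_cons, pvMergeMin]
    exact congrArg some (pvFoldlMin_min l a b)

/-- the comprehension + `min()` of B computes `pvMinOver`. -/
theorem pvBest_eq_minOver (ks : List String) (c : Char) :
    pvBest ks c = pvMinOver ks c := by
  induction ks with
  | nil => rfl
  | cons k ks ih =>
    unfold pvBest at ih ⊢
    simp only [List.filterMap_cons]
    by_cases hc : c ∈ k.toList
    · obtain ⟨i, hi⟩ := Option.isSome_iff_exists.mp ((PySem.List.index?_isSome_iff _ _).mpr hc)
      rw [if_pos hc, hi]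
      simp only [Option.map_some]
      rw [pvMin?_cons, ih, pvMinOver, pvPosIn_eq_some hi]
    · rw [if_neg hc]
      rw [ih, pvMinOver, pvPosIn_eq_none hc]
      rfl

/-- A's break-driven accumulator loop equals B's "−1 if any miss, else sum". -/
theorem pvGoA_eq_score (d : PySem.Dict Char Int) :
    ∀ (l : List Char) (s : Int),
      pvGoA d l s =
        (if none ∈ l.map d.get? then -1 else s + ((l.map d.get?).filterMap id).sum) := by
  intro l
  induction l with
  | nil => intro s; simp [pvGoA]
  | cons c rest ih =>
    intro s
    simp only [pvGoA, List.map_cons]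
    cases hd : d.get? c with
    | none => simp
    | some n =>
      dsimp only
      rw [ih (s + n)]
      by_cases hm : none ∈ rest.map d.get?
      · simp [hm]
      · simp [hm]
        ring

theorem pvScore_eq (keymap : List String) (t : String) :
    pvGoA (pvBuildDict keymap) t.toList 0 = pvScore keymap t := by
  have hget : ∀ c, (pvBuildDict keymap).get? c = pvBest keymap c := by
    intro c
    unfold pvBuildDict
    rw [pvBuildFold_get?, pvBest_eq_minOver]
    rfl
  unfold pvScore
  rw [pvGoA_eq_score]
  have hmap : t.toList.map (pvBuildDict keymap).get? = t.toList.map (pvBest keymap) :=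
    List.map_congr_left (fun c _ => hget c)
  rw [hmap]
  simp

theorem pvFoldl_append_eq_map (f : String → Int) :
    ∀ (ts : List String) (acc : List Int),
      ts.foldl (fun answer target => answer ++ [f target]) acc = acc ++ ts.map f := by
  intro ts
  induction ts with
  | nil => intro acc; simp
  | cons t ts ih => intro acc; simp [List.foldl_cons, ih]

-- ===== VERDICT (by name: the statement is the Claim_ definition above) =====
theorem solution_spec : Claim_equal_solution := by
  intro keymap targets _
  unfold Spec_solution solution solution_alt
  rw [pvFoldl_append_eq_map]
  simp only [List.nil_append]
  exact List.map_congr_left (fun t _ => pvScore_eq keymap t)
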